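-- pv_equiv track=rewrite | github.com/fschatbot/Advent-Calendar-Python | 2015/20.py | part1
-- ===== SOURCE A (Python) =====
-- def part1(data):
-- 	num = data // 10
-- 	# We are just going to keep on delivering presents to each house until we get to the house we are looking for
-- 	houses = [0] * num
-- 	# Loop Through Each Number
-- 	for i in range(1, num):
-- 		# Loop through all the houses that this number is going to visit and deliver the present
-- 		# Starting from i-1 because we need to take 0 in account
-- 		for j in range(i-1, num, i):
-- 			houses[j] += i
-- 	# Check for which house has the number we are looking for
-- 	for index, house in enumerate(houses):
-- 		# ok we need to see which house have "ATLEAST" the number of presents we are looking for, instead of which house has "EXACTLY" the number of presents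
-- 		if house >= num:
-- 			return index + 1
-- ===== SOURCE B (Python) =====
-- def part1(data):
--     num = data // 10
--     # Check each house in turn: its presents are the sum of its divisors,
--     # found by trial division up to sqrt(n), pairing each divisor d with n // d.
--     for n in range(1, num + 1):
--         s = 0
--         d = 1
--         while d * d <= n:
--             if n % d == 0:
--                 s += d
--                 if d != n // d:
--                     s += n // d
--             d += 1
--         if s >= num:
--             return n
-- ===== Notes on version B (the rewrite author's own statement) =====
-- stated objective: alternative
-- what changed: Replaces A's shared sieve table (every i marks all its multiples, then the table is scanned) with independent per-house divisor sums computed by trial division up to sqrt(n), pairing each divisor d with n//d, with an early exit at the first qualifying house.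
-- intended difference: For 10 <= data <= 29 (num = data//10 in {1,2}) A returns None because its sieve loops only over elves below num and so undercounts the last houses, while B returns the true first house (1 resp. 2) whose divisor sum reaches num; B's value is the intended answer since a qualifying house always exists. — e.g. on part1(10): A returns none, B returns some 1
import Mathlib
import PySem

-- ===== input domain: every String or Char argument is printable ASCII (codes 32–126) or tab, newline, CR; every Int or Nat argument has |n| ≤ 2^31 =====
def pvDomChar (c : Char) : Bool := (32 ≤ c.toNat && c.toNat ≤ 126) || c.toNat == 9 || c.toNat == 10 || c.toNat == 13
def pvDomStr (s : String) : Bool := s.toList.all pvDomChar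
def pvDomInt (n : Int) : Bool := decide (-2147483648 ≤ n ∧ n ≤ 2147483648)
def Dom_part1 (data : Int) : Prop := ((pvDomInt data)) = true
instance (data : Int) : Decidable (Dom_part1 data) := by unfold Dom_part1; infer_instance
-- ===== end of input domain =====

-- B replaces A's shared sieve table with independent per-house divisor sums by
-- trial division up to sqrt(n) and an early-exit scan; objective: alternative.

-- ===== PORT A =====
-- houses[j] += i : every j produced by range(i-1, num, i) satisfies 0 ≤ j < num
-- = len(houses), so the in-range list assignment is ported as getD/set.
def part1Sieve (num : Int) (houses : List Int) : List Int :=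
  (PySem.List.pyRange 1 num 1).foldl (fun hs i =>
    (PySem.List.pyRange (i - 1) num i).foldl (fun h j =>
      h.set j.toNat (h.getD j.toNat 0 + i)) hs) houses

-- final 'for index, house in enumerate(houses): if house >= num: return index+1'
def part1Scan (num : Int) : List Int → Int → Option Int
  | [], _ => none
  | h :: t, idx => if h ≥ num then some (idx + 1) else part1Scan num t (idx + 1)

def part1 (data : Int) : Option Int :=
  let num := PySem.Int.floordiv data 10
  let houses := List.replicate num.toNat (0 : Int)  -- [0] * num ([] for num ≤ 0)
  part1Scan num (part1Sieve num houses) 0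

-- ===== PORT B =====
-- d*d <= n forces d <= n: termination measure for the while loop below
theorem pvSqLe (d n : Int) (h : d * d ≤ n) : d ≤ n := by
  by_cases hd : d ≤ 0
  · have := mul_self_nonneg d; omega
  · calc d = d * 1 := (mul_one d).symm
      _ ≤ d * d := by apply mul_le_mul_of_nonneg_left <;> omega
      _ ≤ n := h

-- the 'while d * d <= n' loop of Source B, with accumulator s
def altSigmaAux (n d s : Int) : Int :=
  if _h : d * d ≤ n then
    altSigmaAux n (d + 1)
      (if PySem.Int.mod n d = 0 then
         (if d ≠ PySem.Int.floordiv n d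
          then (s + d) + PySem.Int.floordiv n d
          else s + d)
       else s)
  else s
termination_by (n + 1 - d).toNat
decreasing_by
  have := pvSqLe d n _h
  omega

-- sum of all divisors of n, pairing d with n//d up to sqrt(n)
def altSigma (n : Int) : Int := altSigmaAux n 1 0

def altSearch (num : Int) : List Int → Option Int
  | [] => none
  | n :: rest => if altSigma n ≥ num then some n else altSearch num rest

def part1_alt (data : Int) : Option Int :=
  let num := PySem.Int.floordiv data 10
  altSearch num (PySem.List.pyRange 1 (num + 1) 1)

-- ===== PRECONDITION & SPEC =====
-- For 10 ≤ data ≤ 29 (num = data//10 ∈ {1,2}) A returns none, because its sieve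
-- loops only over elves below num and undercounts the last houses; B returns the
-- first house whose divisor sum reaches num (1 resp. 2), the intended answer.
def D_part1 (data : Int) : Prop := 10 ≤ data ∧ data ≤ 29
instance (data : Int) : Decidable (D_part1 data) := by unfold D_part1; infer_instance

def Spec_part1 (data : Int) (out : Option Int) : Prop := ¬ D_part1 data → out = part1_alt data
instance (data : Int) (out : Option Int) : Decidable (Spec_part1 data out) := by unfold Spec_part1; infer_instance

def pvDiffWitness_part1 : Int := 10
def pvDiffWitnessOut_part1 : (Option Int) × (Option Int) := (none, some 1)

-- ===== CLAIM (what is proved, stated in full; the proofs are below) =====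
def Claim_unchanged_part1 : Prop := ∀ (data : Int), Dom_part1 data → Spec_part1 data (part1 data)
def Claim_changed_part1 : Prop := Dom_part1 (pvDiffWitness_part1) ∧ D_part1 (pvDiffWitness_part1) ∧ part1 (pvDiffWitness_part1) = pvDiffWitnessOut_part1.1 ∧ part1_alt (pvDiffWitness_part1) = pvDiffWitnessOut_part1.2 ∧ pvDiffWitnessOut_part1.1 ≠ pvDiffWitnessOut_part1.2
def Claim_exact_part1 : Prop := ∀ (data : Int), Dom_part1 data → D_part1 data → part1 data ≠ part1_alt data

-- ===== LEMMAS AND PROOFS =====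

-- A's value at house n, as a sum over the outer sieve indices
def aval (num n : Int) : Int :=
  ((PySem.List.pyRange 1 num 1).map (fun i => if PySem.Int.mod n i = 0 then i else 0)).sum

-- folding "add d when P d" is init + sum of the ite-map
theorem foldl_ite_add (P : Int → Prop) [DecidablePred P] :
    ∀ (l : List Int) (init : Int),
      l.foldl (fun s d => if P d then s + d else s) init
        = init + (l.map (fun d => if P d then d else 0)).sum := by
  intro l
  induction l with
  | nil => simp
  | cons x xs ih =>
    intro init
    by_cases h : P x <;> simp [h, ih] <;> ring

-- the inner divisor loop never changes the length of the table
theorem inner_fold_length (i : Int) :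
    ∀ (J : List Int) (hs : List Int),
      (J.foldl (fun h j => h.set j.toNat (h.getD j.toNat 0 + i)) hs).length = hs.length := by
  intro J
  induction J with
  | nil => intro hs; rfl
  | cons x xs ih => intro hs; rw [List.foldl_cons, ih, List.length_set]

-- set preserves length through the whole sieve
theorem part1Sieve_length (num : Int) :
    ∀ (L : List Int) (hs : List Int),
      (L.foldl (fun hs i =>
        (PySem.List.pyRange (i - 1) num i).foldl (fun h j =>
          h.set j.toNat (h.getD j.toNat 0 + i)) hs) hs).length = hs.length := by
  intro L
  induction L with
  | nil => intro hs; rfl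
  | cons x xs ih => intro hs; rw [List.foldl_cons, ih, inner_fold_length x]

theorem getD_set (hs : List Int) (j k : Nat) (v : Int) (hj : j < hs.length) :
    (hs.set j v).getD k 0 = if j = k then v else hs.getD k 0 := by
  simp [List.getD_eq_getElem?_getD, List.getElem?_set]
  split_ifs with h
  · simp
  · rfl

-- inner loop: each in-range index j gains i once per occurrence in J
theorem inner_fold_getD (i : Int) :
    ∀ (J : List Int) (hs : List Int) (k : Nat),
      (∀ j ∈ J, 0 ≤ j ∧ j.toNat < hs.length) →
      (J.foldl (fun h j => h.set j.toNat (h.getD j.toNat 0 + i)) hs).getD k 0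
        = hs.getD k 0 + i * (J.count (k : Int)) := by
  intro J
  induction J with
  | nil => intro hs k _; simp
  | cons x xs ih =>
    intro hs k hb
    obtain ⟨hx0, hxl⟩ := hb x (List.mem_cons_self)
    rw [List.foldl_cons, ih _ k (by intro j hj; simpa [List.length_set] using hb j (List.mem_cons_of_mem _ hj)),
        getD_set hs x.toNat k _ hxl]
    rw [List.count_cons]
    by_cases hxk : x = (k : Int)
    · have h2 : x.toNat = k := by omega
      simp [h2, hxk]; ring
    · have h2 : x.toNat ≠ k := by omega
      simp [h2, hxk]

-- the arithmetic progression range(i-1, num, i) hits k iff i divides k+1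
theorem count_pyRange_step (i num : Int) (k : Nat) (hi : 1 ≤ i) (hk : (k : Int) < num) :
    (PySem.List.pyRange (i - 1) num i).count (k : Int)
      = if PySem.Int.mod ((k : Int) + 1) i = 0 then 1 else 0 := by
  have hip : (0 : Int) < i := by omega
  have hnd : (PySem.List.pyRange (i - 1) num i).Nodup := by
    rw [PySem.List.pyRange_of_pos _ _ hip]
    refine List.Nodup.map ?_ List.nodup_range
    intro a b hab
    have h1 : i * (a : Int) = i * (b : Int) := by linarith
    have h2 : (a : Int) = (b : Int) := mul_left_cancel₀ (by omega) h1
    exact_mod_cast h2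
  have hmem : ((k : Int) ∈ PySem.List.pyRange (i - 1) num i) ↔ PySem.Int.mod ((k : Int) + 1) i = 0 := by
    rw [PySem.List.mem_pyRange_iff_of_pos hip, PySem.Int.mod_eq_zero_iff_dvd]
    constructor
    · rintro ⟨h1, h2, c, hc⟩
      exact ⟨c + 1, by rw [mul_add, mul_one, ← hc]; ring⟩
    · rintro ⟨c, hc⟩
      have hle : i ≤ (k : Int) + 1 := Int.le_of_dvd (by omega) ⟨c, hc⟩
      exact ⟨by omega, hk, ⟨c - 1, by rw [mul_sub, mul_one, ← hc]; ring⟩⟩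
  split_ifs with h
  · exact List.count_eq_one_of_mem hnd (hmem.mpr h)
  · exact List.count_eq_zero_of_not_mem (fun hm => h (hmem.mp hm))

-- outer loop: house k accumulates aval-style contributions
theorem outer_fold_getD (num : Int) :
    ∀ (L : List Int) (hs : List Int) (k : Nat),
      (∀ i ∈ L, 1 ≤ i) → ((hs.length : Int) = num) → (k < hs.length) →
      ((L.foldl (fun hs i =>
          (PySem.List.pyRange (i - 1) num i).foldl (fun h j =>
            h.set j.toNat (h.getD j.toNat 0 + i)) hs) hs).getD k 0)
        = hs.getD k 0
          + ((L.map (fun i => if PySem.Int.mod ((k : Int) + 1) i = 0 then i else 0)).sum) := by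
  intro L
  induction L with
  | nil => intro hs k _ _ _; simp
  | cons x xs ih =>
    intro hs k hL hlen hk
    have hx1 : (1 : Int) ≤ x := hL x (List.mem_cons_self)
    have hb : ∀ j ∈ PySem.List.pyRange (x - 1) num x, 0 ≤ j ∧ j.toNat < hs.length := by
      intro j hj
      have := (PySem.List.mem_pyRange_iff_of_pos (by omega : (0:Int) < x) j).mp hj
      constructor <;> omega
    rw [List.foldl_cons,
        ih _ k (fun i hi => hL i (List.mem_cons_of_mem _ hi))
          (by rw [inner_fold_length]; exact hlen) (by rwa [inner_fold_length]),
        inner_fold_getD x _ hs k hb,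
        count_pyRange_step x num k hx1 (by omega)]
    rw [List.map_cons, List.sum_cons]
    split_ifs with h <;> ring

-- PROOF-SIDE capped sqrt loop: B's loop with every added divisor capped below num
def cSigmaAux (num n d s : Int) : Int :=
  if _h : d * d ≤ n then
    cSigmaAux num n (d + 1)
      (if PySem.Int.mod n d = 0 then
         (if PySem.Int.floordiv n d ≠ d ∧ PySem.Int.floordiv n d < num
          then (if d < num then s + d else s) + PySem.Int.floordiv n d
          else (if d < num then s + d else s))
       else s)
  else s
termination_by (n + 1 - d).toNat
decreasing_by
  have := pvSqLe d n _h
  omega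

def cSigma (num n : Int) : Int := cSigmaAux num n 1 0

-- B's port loop equals the capped loop when n < num (all divisors are < num)
theorem altSigmaAux_eq_capped (num n : Int) (hn : n < num) :
    ∀ (k : Nat) (d s : Int), 1 ≤ d → (n + 1 - d).toNat ≤ k →
      altSigmaAux n d s = cSigmaAux num n d s := by
  intro k
  induction k with
  | zero =>
    intro d s hd hk
    have hdn : n < d := by omega
    have hns : ¬ d * d ≤ n := by nlinarith
    rw [altSigmaAux, cSigmaAux, dif_neg hns, dif_neg hns]
  | succ k ih =>
    intro d s hd hk
    rw [altSigmaAux, cSigmaAux]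
    by_cases h : d * d ≤ n
    · rw [dif_pos h, dif_pos h]
      have hdn : d ≤ n := pvSqLe d n h
      set q := PySem.Int.floordiv n d with hq
      obtain ⟨hq1, hq2⟩ : q * d ≤ n ∧ n < (q + 1) * d := by
        rw [hq]; exact (PySem.Int.floordiv_eq_iff_of_pos (by omega)).mp rfl
      have hqn : q ≤ n := by nlinarith
      have hcond : (if PySem.Int.mod n d = 0 then
             (if q ≠ d ∧ q < num
              then (if d < num then s + d else s) + q
              else (if d < num then s + d else s))
           else s)
          = (if PySem.Int.mod n d = 0 then
               (if d ≠ q then (s + d) + q else s + d)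
             else s) := by
        by_cases hm : PySem.Int.mod n d = 0
        · rw [if_pos hm, if_pos hm, if_pos (show d < num by omega)]
          by_cases hne : q = d
          · rw [if_neg (by rintro ⟨hc, -⟩; exact hc hne), if_neg (by omega)]
          · rw [if_pos ⟨hne, by omega⟩, if_pos (by omega)]
        · rw [if_neg hm, if_neg hm]
      rw [← hcond, ih (d + 1) _ (by omega) (by omega)]
    · rw [dif_neg h, dif_neg h]

-- remaining contribution of the capped sqrt loop from state d, at divisor e
def pvTerm (num n d e : Int) : Int :=
  if PySem.Int.mod n e = 0 ∧ e < num ∧ d ≤ e ∧ e * d ≤ n then e else 0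

-- a sum supported on a single point of a Nodup list
theorem sum_ite_eq_single (a : Int) (P : Int → Prop) [DecidablePred P] :
    ∀ (l : List Int), l.Nodup →
      (l.map (fun e => if e = a ∧ P e then e else 0)).sum
        = if a ∈ l ∧ P a then a else 0 := by
  intro l
  induction l with
  | nil => intro _; simp
  | cons x xs ih =>
    intro hnd
    rw [List.map_cons, List.sum_cons, ih (List.Nodup.of_cons hnd)]
    by_cases hxa : x = a
    · subst hxa
      have hx : x ∉ xs := (List.nodup_cons.mp hnd).1
      rw [if_neg (fun hc : x ∈ xs ∧ P x => hx hc.1), add_zero]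
      by_cases hp : P x
      · rw [if_pos ⟨rfl, hp⟩, if_pos ⟨List.mem_cons_self, hp⟩]
      · rw [if_neg (fun hc : x = x ∧ P x => hp hc.2),
            if_neg (fun hc : x ∈ x :: xs ∧ P x => hp hc.2)]
    · rw [if_neg (fun hc => hxa hc.1), zero_add]
      by_cases hax : a ∈ xs ∧ P a
      · rw [if_pos hax, if_pos ⟨List.mem_cons_of_mem _ hax.1, hax.2⟩]
      · rw [if_neg hax,
            if_neg (fun hc => hax ⟨(List.mem_cons.mp hc.1).resolve_left
              (fun h => hxa h.symm), hc.2⟩)]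

-- one sqrt-loop step, seen pointwise at divisor e
theorem pvTerm_step (num n d e : Int) (hd : 1 ≤ d) (hdd : d * d ≤ n)
    (he : 1 ≤ e) (hen : e ≤ n) :
    pvTerm num n d e
      = pvTerm num n (d + 1) e
        + ((if e = d ∧ (PySem.Int.mod n e = 0 ∧ e < num) then e else 0)
           + (if e = PySem.Int.floordiv n d
                  ∧ (PySem.Int.mod n e = 0 ∧ e ≠ d ∧ e < num) then e else 0)) := by
  set q := PySem.Int.floordiv n d with hqdef
  obtain ⟨hq1, hq2⟩ : q * d ≤ n ∧ n < (q + 1) * d := by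
    rw [hqdef]
    exact (PySem.Int.floordiv_eq_iff_of_pos (by omega)).mp rfl
  unfold pvTerm
  by_cases h1 : PySem.Int.mod n e = 0
  case neg => simp [h1]
  by_cases h2 : e < num
  case neg => simp [h1, h2]
  obtain ⟨f, hf⟩ := (PySem.Int.mod_eq_zero_iff_dvd n e).mp h1
  by_cases hed : e = d
  · subst hed
    rw [if_pos ⟨h1, h2, le_refl e, hdd⟩,
        if_neg (by rintro ⟨-, -, h3, -⟩; omega),
        if_pos ⟨rfl, h1, h2⟩,
        if_neg (by rintro ⟨-, -, hne, -⟩; exact hne rfl)]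
    ring
  · by_cases h3 : d + 1 ≤ e ∧ e * (d + 1) ≤ n
    · obtain ⟨h31, h32⟩ := h3
      have hl4 : e * d ≤ n := by nlinarith [h32]
      rw [if_pos ⟨h1, h2, by omega, hl4⟩, if_pos ⟨h1, h2, h31, h32⟩,
          if_neg (by rintro ⟨he2, -⟩; exact hed he2),
          if_neg ?_]
      · ring
      · rintro ⟨heq, -⟩
        rw [heq] at h32 h31
        have e1 : q * (d + 1) = q * d + q := by ring
        have e2 : (q + 1) * d = q * d + d := by ring
        rw [e1] at h32
        rw [e2] at hq2
        omega
    · by_cases h4 : d ≤ e ∧ e * d ≤ n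
      · have hde1 : d + 1 ≤ e := by
          rcases h4 with ⟨h41, -⟩
          omega
        have hgt : n < e * (d + 1) := by
          by_contra hcon
          push_neg at hcon
          exact h3 ⟨hde1, hcon⟩
        have hdf : d ≤ f := by nlinarith [h4.2, hf]
        have hfd2 : f ≤ d := by nlinarith [hgt, hf]
        have hfd : f = d := le_antisymm hfd2 hdf
        have hqe : q = e := by
          rw [hqdef, hf, hfd, PySem.Int.floordiv_eq_ediv_of_pos (by omega : (0:Int) < d)]
          exact Int.mul_ediv_cancel e (by omega)
        rw [if_pos ⟨h1, h2, h4.1, h4.2⟩,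
            if_neg (by rintro ⟨-, -, -, hc⟩; omega),
            if_neg (by rintro ⟨he2, -⟩; exact hed he2),
            if_pos ⟨hqe.symm, h1, hed, h2⟩]
        ring
      · rw [if_neg (by rintro ⟨-, -, ha, hb⟩; exact h4 ⟨ha, hb⟩),
            if_neg (by rintro ⟨-, -, ha, hb⟩; exact h4 ⟨by omega, by nlinarith⟩),
            if_neg (by rintro ⟨he2, -⟩; exact hed he2),
            if_neg ?_]
        · ring
        · rintro ⟨heq, -, -, -⟩
          apply h4
          have e2 : (q + 1) * d = q * d + d := by ring
          rw [e2] at hq2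
          have hdq : d ≤ q := by nlinarith [hdd, hq2, hd]
          constructor
          · omega
          · rw [heq]; exact hq1

-- the sqrt loop adds exactly the capped per-step increment to the remaining sum
theorem sum_term_step (num n d : Int) (hd : 1 ≤ d) (hdd : d * d ≤ n) :
    ((PySem.List.pyRange 1 (n + 1) 1).map (fun e => pvTerm num n d e)).sum
      = ((PySem.List.pyRange 1 (n + 1) 1).map (fun e => pvTerm num n (d + 1) e)).sum
        + (if PySem.Int.mod n d = 0 then
            ((if d < num then d else 0)
             + (if PySem.Int.floordiv n d ≠ d ∧ PySem.Int.floordiv n d < num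
                then PySem.Int.floordiv n d else 0))
           else 0) := by
  set q := PySem.Int.floordiv n d with hqdef
  obtain ⟨hq1, hq2⟩ : q * d ≤ n ∧ n < (q + 1) * d := by
    rw [hqdef]
    exact (PySem.Int.floordiv_eq_iff_of_pos (by omega)).mp rfl
  have hcong : (PySem.List.pyRange 1 (n + 1) 1).map (fun e => pvTerm num n d e)
      = (PySem.List.pyRange 1 (n + 1) 1).map (fun e => pvTerm num n (d + 1) e
          + ((if e = d ∧ (PySem.Int.mod n e = 0 ∧ e < num) then e else 0)
             + (if e = q ∧ (PySem.Int.mod n e = 0 ∧ e ≠ d ∧ e < num) then e else 0))) := by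
    refine List.map_congr_left ?_
    intro e hm
    have hmm := PySem.List.mem_pyRange_one.mp hm
    rw [hqdef]
    exact pvTerm_step num n d e hd hdd (by omega) (by omega)
  rw [hcong, PySem.List.sum_map_add_int, PySem.List.sum_map_add_int,
      sum_ite_eq_single d _ _ (PySem.List.nodup_pyRange_one 1 (n + 1)),
      sum_ite_eq_single q _ _ (PySem.List.nodup_pyRange_one 1 (n + 1))]
  have hdn : d ≤ n := pvSqLe d n hdd
  have hmem1 : d ∈ PySem.List.pyRange 1 (n + 1) 1 :=
    PySem.List.mem_pyRange_one.mpr ⟨hd, by omega⟩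
  by_cases hm : PySem.Int.mod n d = 0
  · obtain ⟨c, hc⟩ := (PySem.Int.mod_eq_zero_iff_dvd n d).mp hm
    have hc1 : 1 ≤ c := by nlinarith
    have hqe : q = c := by
      rw [hqdef, hc, PySem.Int.floordiv_eq_ediv_of_pos (by omega : (0:Int) < d), mul_comm]
      exact Int.mul_ediv_cancel c (by omega)
    have hcn : c ≤ n := by nlinarith
    have hmem2 : q ∈ PySem.List.pyRange 1 (n + 1) 1 :=
      PySem.List.mem_pyRange_one.mpr ⟨by omega, by omega⟩
    have hmq : PySem.Int.mod n q = 0 :=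
      (PySem.Int.mod_eq_zero_iff_dvd n q).mpr ⟨d, by rw [hc, hqe]; ring⟩
    rw [if_pos hm]
    simp only [hmem1, hmem2, hm, hmq, true_and]
    all_goals first | (split_ifs <;> ring) | ring
  · rw [if_neg (by rintro ⟨-, hm2, -⟩; exact hm hm2),
        if_neg ?_, if_neg hm]
    · ring
    · rintro ⟨hmem, hmq, hne, hlt⟩
      obtain ⟨g, hg⟩ := (PySem.Int.mod_eq_zero_iff_dvd n q).mp hmq
      have hqpos : 1 ≤ q := (PySem.List.mem_pyRange_one.mp hmem).1
      have hdq : d ≤ q := by nlinarith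
      have hdg : d ≤ g := by nlinarith
      have hgd2 : g ≤ d := by nlinarith
      have hgd : g = d := le_antisymm hgd2 hdg
      exact hm ((PySem.Int.mod_eq_zero_iff_dvd n d).mpr ⟨q, by rw [hg, hgd]; ring⟩)

-- past sqrt(n), nothing remains to add
theorem sum_term_empty (num n d : Int) (hd : 1 ≤ d) (hns : ¬ d * d ≤ n) :
    ((PySem.List.pyRange 1 (n + 1) 1).map (fun e => pvTerm num n d e)).sum = 0 := by
  refine List.sum_eq_zero ?_
  intro x hx
  obtain ⟨e, he, rfl⟩ := List.mem_map.mp hx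
  have hmm := PySem.List.mem_pyRange_one.mp he
  unfold pvTerm
  rw [if_neg]
  rintro ⟨-, -, hde, hedn⟩
  exact hns (by nlinarith [hde, hedn, hd])

-- the capped-loop invariant, by induction on the remaining fuel
theorem cSigmaAux_invariant (num n : Int) :
    ∀ (k : Nat) (d s : Int), 1 ≤ d → (n + 1 - d).toNat ≤ k →
      cSigmaAux num n d s
        = s + ((PySem.List.pyRange 1 (n + 1) 1).map (fun e => pvTerm num n d e)).sum := by
  intro k
  induction k with
  | zero =>
    intro d s hd hk
    have hdn : n < d := by omega
    have hns : ¬ d * d ≤ n := by nlinarith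
    rw [cSigmaAux, dif_neg hns, sum_term_empty num n d hd hns, add_zero]
  | succ k ih =>
    intro d s hd hk
    rw [cSigmaAux]
    by_cases h : d * d ≤ n
    · rw [dif_pos h]
      have hdn : d ≤ n := pvSqLe d n h
      rw [ih (d + 1) _ (by omega) (by omega), sum_term_step num n d hd h]
      split_ifs <;> ring
    · rw [dif_neg h, sum_term_empty num n d hd h, add_zero]

-- the full trial-division sum the capped loop computes
def fullSigma (num n : Int) : Int :=
  (PySem.List.pyRange 1 (n + 1) 1).foldl
    (fun s d => if PySem.Int.mod n d = 0 ∧ d < num then s + d else s) 0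

-- the sqrt-paired capped sum equals the full capped trial-division sum
theorem cSigma_eq_full (num n : Int) (hn : 1 ≤ n) :
    cSigma num n = fullSigma num n := by
  unfold cSigma fullSigma
  rw [cSigmaAux_invariant num n (n + 1 - 1).toNat 1 0 le_rfl le_rfl, zero_add,
      foldl_ite_add (fun d => PySem.Int.mod n d = 0 ∧ d < num), zero_add]
  refine congrArg List.sum (List.map_congr_left ?_)
  intro e hm
  have hmm := PySem.List.mem_pyRange_one.mp hm
  unfold pvTerm
  by_cases hc : PySem.Int.mod n e = 0 ∧ e < num
  · rw [if_pos ⟨hc.1, hc.2, hmm.1, by omega⟩, if_pos hc]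
  · rw [if_neg (by rintro ⟨ha, hb, -, -⟩; exact hc ⟨ha, hb⟩), if_neg hc]

-- the capped sqrt divisor sum equals A's sieve-range sum, for 1 ≤ n ≤ num
theorem cSigma_eq_aval (num n : Int) (h1 : 1 ≤ n) (h2 : n ≤ num) :
    cSigma num n = aval num n := by
  rw [cSigma_eq_full num n h1]
  unfold fullSigma aval
  rw [foldl_ite_add (fun d => PySem.Int.mod n d = 0 ∧ d < num), zero_add]
  have hsplit := PySem.List.pyRange_one_append 1 (n + 1) (num + 1) (by omega) (by omega)
  have htail : ((PySem.List.pyRange (n + 1) (num + 1) 1).map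
      (fun d => if PySem.Int.mod n d = 0 ∧ d < num then d else 0)).sum = 0 := by
    refine List.sum_eq_zero ?_
    intro x hx
    obtain ⟨d, hd, rfl⟩ := List.mem_map.mp hx
    have hdm := PySem.List.mem_pyRange_one.mp hd
    have hmod : PySem.Int.mod n d = n := by
      rw [PySem.Int.mod_eq_emod_of_pos (by omega)]
      exact Int.emod_eq_of_lt (by omega) (by omega)
    have hc : ¬(PySem.Int.mod n d = 0 ∧ d < num) := by
      rintro ⟨hc0, _⟩; rw [hmod] at hc0; omega
    rw [if_neg hc]
  have hlast := PySem.List.pyRange_one_succ_right (a := 1) (b := num) (by omega)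
  have hfull : ((PySem.List.pyRange 1 (num + 1) 1).map
        (fun d => if PySem.Int.mod n d = 0 ∧ d < num then d else 0)).sum
      = ((PySem.List.pyRange 1 (n + 1) 1).map
        (fun d => if PySem.Int.mod n d = 0 ∧ d < num then d else 0)).sum := by
    rw [hsplit, List.map_append, List.sum_append, htail, add_zero]
  have hfull2 : ((PySem.List.pyRange 1 (num + 1) 1).map
        (fun d => if PySem.Int.mod n d = 0 ∧ d < num then d else 0)).sum
      = ((PySem.List.pyRange 1 num 1).map (fun i => if PySem.Int.mod n i = 0 then i else 0)).sum := by
    rw [hlast, List.map_append, List.sum_append]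
    have hnum0 : (if PySem.Int.mod n num = 0 ∧ num < num then num else 0) = 0 := by
      rw [if_neg]; rintro ⟨_, hlt⟩; omega
    have hcong : (PySem.List.pyRange 1 num 1).map
          (fun d => if PySem.Int.mod n d = 0 ∧ d < num then d else 0)
        = (PySem.List.pyRange 1 num 1).map (fun i => if PySem.Int.mod n i = 0 then i else 0) := by
      refine List.map_congr_left ?_
      intro a ha
      have := PySem.List.mem_pyRange_one.mp ha
      by_cases hm : PySem.Int.mod n a = 0 <;> simp [hm] <;> omega
    rw [hcong, List.map_singleton, List.sum_singleton, hnum0, add_zero]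
  rw [← hfull2, hfull]

-- B's uncapped divisor sum equals A's sieve sum for houses strictly below num
theorem altSigma_eq_aval (num n : Int) (h1 : 1 ≤ n) (h2 : n < num) :
    altSigma n = aval num n := by
  rw [show altSigma n = cSigma num n from
        altSigmaAux_eq_capped num n h2 (n + 1 - 1).toNat 1 0 le_rfl le_rfl,
      cSigma_eq_aval num n h1 (by omega)]

-- generic first-hit scan, shared shape of both result scans
def srch (num : Int) (f : Int → Int) : List Int → Option Int
  | [] => none
  | n :: rest => if f n ≥ num then some n else srch num f rest

theorem srch_congr (num : Int) (f g : Int → Int) :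
    ∀ (L : List Int), (∀ n ∈ L, f n = g n) → srch num f L = srch num g L := by
  intro L
  induction L with
  | nil => intro _; rfl
  | cons x xs ih =>
    intro h
    show (if f x ≥ num then some x else srch num f xs)
        = (if g x ≥ num then some x else srch num g xs)
    rw [h x List.mem_cons_self, ih (fun n hn => h n (List.mem_cons_of_mem _ hn))]

theorem srch_append (num : Int) (f : Int → Int) :
    ∀ (L1 L2 : List Int), srch num f (L1 ++ L2) = (srch num f L1).or (srch num f L2) := by
  intro L1
  induction L1 with
  | nil => intro L2; rfl
  | cons x xs ih =>
    intro L2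
    show (if f x ≥ num then some x else srch num f (xs ++ L2))
        = ((if f x ≥ num then some x else srch num f xs).or (srch num f L2))
    split_ifs with h
    · rfl
    · exact ih L2

theorem srch_isSome_of_mem (num : Int) (f : Int → Int) :
    ∀ (L : List Int) (n : Int), n ∈ L → f n ≥ num → (srch num f L).isSome = true := by
  intro L
  induction L with
  | nil => intro n hn; cases hn
  | cons x xs ih =>
    intro n hn hf
    show (if f x ≥ num then some x else srch num f xs).isSome = true
    split_ifs with h
    · rfl
    · rcases List.mem_cons.mp hn with rfl | hmem
      · exact absurd hf h
      · exact ih n hmem hf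

-- B's scan is the generic scan with f = altSigma
theorem altSearch_eq_srch (num : Int) :
    ∀ (L : List Int), altSearch num L = srch num altSigma L := by
  intro L
  induction L with
  | nil => rfl
  | cons x xs ih =>
    show (if altSigma x ≥ num then some x else altSearch num xs)
        = (if altSigma x ≥ num then some x else srch num altSigma xs)
    rw [ih]

-- A's scan over the table is the generic scan over house numbers
theorem part1Scan_eq_srch (num : Int) (f : Int → Int) :
    ∀ (hs : List Int) (idx : Int),
      (∀ k : Nat, k < hs.length → hs.getD k 0 = f (idx + 1 + k)) →
      part1Scan num hs idx = srch num f (PySem.List.pyRange (idx + 1) (idx + 1 + hs.length) 1) := by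
  intro hs
  induction hs with
  | nil => intro idx _; simp [part1Scan, srch, PySem.List.pyRange_one_eq_nil]
  | cons h t ih =>
    intro idx hp
    have h0 : h = f (idx + 1) := by simpa using hp 0 (by simp)
    have hlen : (idx + 1 + (((h :: t).length : Nat) : Int)) = idx + 1 + 1 + (t.length : Int) := by
      simp [List.length_cons]; push_cast; ring
    rw [hlen]
    have hlt : idx + 1 < idx + 1 + 1 + (t.length : Int) := by
      have hnn : (0:Int) ≤ (t.length : Int) := Int.natCast_nonneg _
      omega
    rw [PySem.List.pyRange_one_cons hlt]
    show (if h ≥ num then some (idx + 1) else part1Scan num t (idx + 1))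
        = (if f (idx + 1) ≥ num then some (idx + 1)
           else srch num f (PySem.List.pyRange (idx + 1 + 1) (idx + 1 + 1 + (t.length : Int)) 1))
    rw [h0]
    split_ifs with hge
    · rfl
    · refine ih (idx + 1) ?_
      intro k hk
      have h2 := hp (k + 1) (by simpa using Nat.succ_lt_succ hk)
      rw [List.getD_cons_succ] at h2
      rw [h2]
      congr 1
      push_cast
      ring

-- the sieve sum at house n is at least n + 1 when 2 ≤ n < num (divisors 1 and n)
theorem aval_ge (num n : Int) (h1 : 2 ≤ n) (h2 : n < num) : n + 1 ≤ aval num n := by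
  unfold aval
  have hpt : ∀ i ∈ PySem.List.pyRange 1 num 1,
      (fun e => (if e = 1 ∧ True then e else 0) + (if e = n ∧ True then e else 0)) i
        ≤ (fun i => if PySem.Int.mod n i = 0 then i else 0) i := by
    intro i hi
    have hm := PySem.List.mem_pyRange_one.mp hi
    by_cases hi1 : i = 1
    · subst hi1
      have : PySem.Int.mod n 1 = 0 := (PySem.Int.mod_eq_zero_iff_dvd n 1).mpr ⟨n, (one_mul n).symm⟩
      simp [this]
      omega
    · by_cases hin : i = n
      · subst hin
        have hdd : PySem.Int.mod i i = 0 := (PySem.Int.mod_eq_zero_iff_dvd i i).mpr ⟨1, (mul_one i).symm⟩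
        simp [hdd, hi1]
      · simp only [hi1, hin, false_and, if_false, add_zero]
        split_ifs with h
        · omega
        · omega
  have hle := List.sum_le_sum hpt
  have hsum : ((PySem.List.pyRange 1 num 1).map
        (fun e => (if e = 1 ∧ True then e else 0) + (if e = n ∧ True then e else 0))).sum
      = n + 1 := by
    rw [PySem.List.sum_map_add_int,
        sum_ite_eq_single 1 (fun _ => True) _ (PySem.List.nodup_pyRange_one 1 num),
        sum_ite_eq_single n (fun _ => True) _ (PySem.List.nodup_pyRange_one 1 num)]
    have hm1 : (1 : Int) ∈ PySem.List.pyRange 1 num 1 :=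
      PySem.List.mem_pyRange_one.mpr ⟨le_refl 1, by omega⟩
    have hmn : n ∈ PySem.List.pyRange 1 num 1 :=
      PySem.List.mem_pyRange_one.mpr ⟨by omega, h2⟩
    simp [hm1, hmn]
    ring
  omega

-- the table A builds holds aval num (k+1) at index k
theorem table_getD (num : Int) (hpos : 1 ≤ num) (k : Nat) (hk : k < num.toNat) :
    (part1Sieve num (List.replicate num.toNat (0 : Int))).getD k 0 = aval num ((k : Int) + 1) := by
  unfold part1Sieve
  rw [outer_fold_getD num _ _ k
      (fun i hi => (PySem.List.mem_pyRange_one.mp hi).1)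
      (by simp; omega) (by simpa using hk)]
  rw [List.getD_replicate _ (by simpa using hk)]
  rw [zero_add]
  rfl

-- closed-form values of B's divisor sum at houses 1 and 2 (for the D_ region)
theorem altSigma_one : altSigma 1 = 1 := by
  unfold altSigma
  rw [altSigmaAux]; norm_num
  rw [altSigmaAux]; norm_num

theorem altSigma_two : altSigma 2 = 3 := by
  unfold altSigma
  rw [altSigmaAux]; norm_num
  rw [altSigmaAux]; norm_num

theorem part1_alt_num1 (data : Int) (h : PySem.Int.floordiv data 10 = 1) :
    part1_alt data = some 1 := by
  simp only [part1_alt, h]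
  rw [show PySem.List.pyRange 1 (1 + 1) 1 = [1] by decide]
  simp [altSearch, altSigma_one]

theorem part1_alt_num2 (data : Int) (h : PySem.Int.floordiv data 10 = 2) :
    part1_alt data = some 2 := by
  simp only [part1_alt, h]
  rw [show PySem.List.pyRange 1 (2 + 1) 1 = [1, 2] by decide]
  simp [altSearch, altSigma_one, altSigma_two]

-- ===== VERDICT (by name: the statement is the Claim_ definition above) =====
theorem part1_spec : Claim_unchanged_part1 := by
  unfold Claim_unchanged_part1
  intro data _ hnd
  simp only [Spec_part1, D_part1, not_and_or, not_le] at hnd ⊢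
  simp only [part1, part1_alt]
  set num := PySem.Int.floordiv data 10 with hnum
  have hnumv : num = data / 10 := by
    rw [hnum, PySem.Int.floordiv_eq_ediv_of_pos (by omega : (0:Int) < 10)]
  clear_value num
  have hcase : num ≤ 0 ∨ 3 ≤ num := by
    rcases hnd with h | h <;> omega
  rcases hcase with hle | hge
  · -- num ≤ 0: empty table, empty range, both none
    have h0 : num.toNat = 0 := by omega
    have hnil : part1Sieve num (List.replicate num.toNat (0 : Int)) = [] := by
      rw [← List.length_eq_zero_iff]
      unfold part1Sieve
      rw [part1Sieve_length]
      simp [h0]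
    rw [hnil, PySem.List.pyRange_one_eq_nil (by omega : num + 1 ≤ 1)]
    rfl
  · -- 3 ≤ num: both scans stop at or before house num-1, where the sums agree
    have hlen : (part1Sieve num (List.replicate num.toNat (0 : Int))).length = num.toNat := by
      unfold part1Sieve
      rw [part1Sieve_length]
      simp
    rw [part1Scan_eq_srch num (aval num) _ 0 (by
        intro k hk
        rw [hlen] at hk
        rw [table_getD num (by omega) k hk]
        ring_nf), altSearch_eq_srch num, hlen,
        show (0:Int) + 1 = 1 by ring,
        show (1:Int) + (num.toNat : Int) = num + 1 by omega]
    rw [PySem.List.pyRange_one_succ_right (a := 1) (b := num) (by omega),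
        srch_append, srch_append]
    have hpre : srch num (aval num) (PySem.List.pyRange 1 num 1)
        = srch num altSigma (PySem.List.pyRange 1 num 1) := by
      refine srch_congr num _ _ _ ?_
      intro n hn
      have hm := PySem.List.mem_pyRange_one.mp hn
      exact (altSigma_eq_aval num n hm.1 hm.2).symm
    have hsome : (srch num (aval num) (PySem.List.pyRange 1 num 1)).isSome = true := by
      refine srch_isSome_of_mem num _ _ (num - 1) ?_ ?_
      · exact PySem.List.mem_pyRange_one.mpr ⟨by omega, by omega⟩
      · have := aval_ge num (num - 1) (by omega) (by omega)
        omega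
    obtain ⟨x, hx⟩ := Option.isSome_iff_exists.mp hsome
    rw [← hpre, hx]
    rfl

theorem part1_changed : Claim_changed_part1 := by
  unfold Claim_changed_part1
  refine ⟨by decide, by decide, by decide, ?_, by decide⟩
  exact part1_alt_num1 10 (by decide)

theorem part1_tight : Claim_exact_part1 := by
  unfold Claim_exact_part1
  intro data _ hd
  obtain ⟨h1, h2⟩ := hd
  have hnum : PySem.Int.floordiv data 10 = 1 ∨ PySem.Int.floordiv data 10 = 2 := by
    rw [PySem.Int.floordiv_eq_ediv_of_pos (by omega : (0:Int) < 10)]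
    omega
  have ha : part1 data = none := by
    rcases hnum with h | h <;> (simp only [part1, h]; decide)
  rcases hnum with h | h
  · rw [ha, part1_alt_num1 data h]; simp
  · rw [ha, part1_alt_num2 data h]; simp
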